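-- pv_equiv track=rewrite | github.com/en25300186-sliit/MyWeb | ai_agent/neuro_symbolic.py | _collect_is_leaves
-- ===== SOURCE A (Python) =====
-- _BE_VERBS: frozenset = frozenset({"is", "are", "am", "was", "were"})
--
-- def _collect_is_leaves(subject: str, facts: list[dict],
--                        visited: set[str] | None = None) -> list[str]:
--     """Return the most-specific (leaf) entities that ARE *subject*.
--
--     Starting from *subject*, follows the ``is``/``are`` chain downward
--     (i.e. finds entities X where ``X is subject``).  Recursion stops at
--     nodes that have no further ``is`` children – those are the leaves.
--
--     Cycle-safe via *visited*.
--     """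
--     if visited is None:
--         visited = set()
--     subject_lower = subject.lower()
--     if subject_lower in visited:
--         return [subject]
--     visited.add(subject_lower)
--
--     children: list[str] = [
--         f.get("subject", "")
--         for f in facts
--         if f.get("value", "").lower() == subject_lower
--         and f.get("relation", "").lower() in _BE_VERBS
--     ]
--     if not children:
--         return [subject]
--
--     leaves: list[str] = []
--     for child in children:
--         leaves.extend(_collect_is_leaves(child, facts, visited))
--     return leaves
-- ===== SOURCE B (Python) =====
-- _BE_VERBS: frozenset = frozenset({"is", "are", "am", "was", "were"})
--
-- def _collect_is_leaves(subject: str, facts: list[dict],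
--                        visited: set[str] | None = None) -> list[str]:
--     """Same result as A, but the value->children index is built once,
--     so each DFS node does a dict lookup rather than its own pass over facts."""
--     if visited is None:
--         visited = set()
--     index: dict[str, list[str]] = {}
--     for f in facts:
--         if f.get("relation", "").lower() in _BE_VERBS:
--             index.setdefault(f.get("value", "").lower(), []).append(f.get("subject", ""))
--
--     leaves: list[str] = []
--
--     def dfs(node: str) -> None:
--         node_lower = node.lower()
--         if node_lower in visited:
--             leaves.append(node)
--             return
--         visited.add(node_lower)
--         children = index.get(node_lower)
--         if not children:
--             leaves.append(node)
--             return
--         for child in children: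
--             dfs(child)
--
--     dfs(subject)
--     return leaves
-- ===== Notes on version B (the rewrite author's own statement) =====
-- stated objective: alternative
-- what changed: B builds a value->children index dict in one pass over facts and walks the is-chain with dict lookups and an accumulator-appending DFS, instead of A rescanning all facts with a comprehension at every recursive node; it trades one up-front indexing pass for the per-node scans.
import Mathlib
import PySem

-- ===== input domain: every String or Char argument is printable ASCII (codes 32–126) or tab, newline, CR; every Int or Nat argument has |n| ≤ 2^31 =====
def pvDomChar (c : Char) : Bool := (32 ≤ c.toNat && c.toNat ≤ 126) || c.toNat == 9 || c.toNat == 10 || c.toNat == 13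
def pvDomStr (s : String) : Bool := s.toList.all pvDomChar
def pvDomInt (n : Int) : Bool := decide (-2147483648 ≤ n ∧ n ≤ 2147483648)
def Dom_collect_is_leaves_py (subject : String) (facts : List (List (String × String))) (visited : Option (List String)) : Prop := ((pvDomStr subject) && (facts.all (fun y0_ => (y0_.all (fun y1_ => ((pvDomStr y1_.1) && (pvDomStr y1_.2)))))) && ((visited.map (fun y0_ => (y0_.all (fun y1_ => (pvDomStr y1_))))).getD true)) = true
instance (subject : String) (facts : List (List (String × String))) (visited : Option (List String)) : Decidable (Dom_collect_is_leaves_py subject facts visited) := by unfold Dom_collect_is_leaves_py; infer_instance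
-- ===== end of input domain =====

-- B builds a value->children index once and walks it with an accumulator DFS, instead of A's per-node comprehension over all facts.
-- A mutates the caller's `visited` set in place; B performs the same mutation, and the equivalence proved here is about the return value.

-- shared primitives of both Pythons: f.get(key, "") on a fact dict (first match), the verb set, and the initial visited set
def pvGet (f : List (String × String)) (k : String) : String :=
  ((f.find? (fun p => p.1 == k)).map (·.2)).getD ""

def pvBeVerbs : List String := ["is", "are", "am", "was", "were"]

def pvInitVisited (visited : Option (List String)) : PySem.Set String :=
  match visited with
  | none => PySem.Set.empty
  | some l => PySem.Set.ofList l

-- ===== PORT A =====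
-- the list comprehension `children` in A
def pvChildrenA (subject_lower : String) (facts : List (List (String × String))) : List String :=
  (facts.filter (fun f =>
      (PySem.Str.lower (pvGet f "value") == subject_lower) &&
      pvBeVerbs.contains (PySem.Str.lower (pvGet f "relation")))).map
    (fun f => pvGet f "subject")

-- fuel guard only (fuel = facts.length + 1 is never exhausted: each recursion level adds
-- a new lowered subject to visited, and all deeper subjects come from facts)
mutual
def pvGoA : Nat → String → List (List (String × String)) → PySem.Set String → List String × PySem.Set String
  | 0, subject, _, vis => ([subject], vis)
  | fuel+1, subject, facts, vis =>
    let subject_lower := PySem.Str.lower subject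
    if PySem.Set.contains vis subject_lower then ([subject], vis)
    else
      let vis1 := PySem.Set.add vis subject_lower
      let children := pvChildrenA subject_lower facts
      if children.isEmpty then ([subject], vis1)
      else pvGoAList fuel children facts vis1
termination_by fuel _ _ _ => (fuel, 0)

def pvGoAList : Nat → List String → List (List (String × String)) → PySem.Set String → List String × PySem.Set String
  | _, [], _, vis => ([], vis)
  | fuel, c :: cs, facts, vis =>
    let r := pvGoA fuel c facts vis
    let rest := pvGoAList fuel cs facts r.2
    (r.1 ++ rest.1, rest.2)
termination_by fuel cs _ _ => (fuel, cs.length + 1)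
end

def collect_is_leaves_py (subject : String) (facts : List (List (String × String))) (visited : Option (List String)) : List String :=
  (pvGoA (facts.length + 1) subject facts (pvInitVisited visited)).1

-- ===== PORT B =====
-- one pass over facts: index.setdefault(value.lower(), []).append(subject)
def pvIndexStep (idx : PySem.Dict String (List String)) (f : List (String × String)) : PySem.Dict String (List String) :=
  if pvBeVerbs.contains (PySem.Str.lower (pvGet f "relation")) then
    PySem.Dict.modify idx (PySem.Str.lower (pvGet f "value")) [] (fun l => l ++ [pvGet f "subject"])
  else idx

def pvBuildIndex (facts : List (List (String × String))) : PySem.Dict String (List String) :=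
  facts.foldl pvIndexStep PySem.Dict.empty

-- dfs appends leaves to the shared accumulator `leaves` (the nested function in Source B)
mutual
def pvDfsB : Nat → String → PySem.Dict String (List String) → PySem.Set String → List String → List String × PySem.Set String
  | 0, node, _, vis, leaves => (leaves ++ [node], vis)
  | fuel+1, node, idx, vis, leaves =>
    let node_lower := PySem.Str.lower node
    if PySem.Set.contains vis node_lower then (leaves ++ [node], vis)
    else
      let vis1 := PySem.Set.add vis node_lower
      let children := PySem.Dict.getD idx node_lower []   -- index.get; `if not children` covers None and []
      if children.isEmpty then (leaves ++ [node], vis1)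
      else pvDfsBList fuel children idx vis1 leaves
termination_by fuel _ _ _ _ => (fuel, 0)

def pvDfsBList : Nat → List String → PySem.Dict String (List String) → PySem.Set String → List String → List String × PySem.Set String
  | _, [], _, vis, leaves => (leaves, vis)
  | fuel, c :: cs, idx, vis, leaves =>
    let r := pvDfsB fuel c idx vis leaves
    pvDfsBList fuel cs idx r.2 r.1
termination_by fuel cs _ _ _ => (fuel, cs.length + 1)
end

def collect_is_leaves_py_alt (subject : String) (facts : List (List (String × String))) (visited : Option (List String)) : List String :=
  (pvDfsB (facts.length + 1) subject (pvBuildIndex facts) (pvInitVisited visited) []).1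

-- ===== PRECONDITION & SPEC =====
def Spec_collect_is_leaves_py (subject : String) (facts : List (List (String × String))) (visited : Option (List String)) (out : List String) : Prop := out = collect_is_leaves_py_alt subject facts visited
instance (subject : String) (facts : List (List (String × String))) (visited : Option (List String)) (out : List String) : Decidable (Spec_collect_is_leaves_py subject facts visited out) := by unfold Spec_collect_is_leaves_py; infer_instance

-- ===== CLAIM (what is proved, stated in full; the proofs are below) =====
def Claim_equal_collect_is_leaves_py : Prop := ∀ (subject : String) (facts : List (List (String × String))) (visited : Option (List String)), Dom_collect_is_leaves_py subject facts visited → Spec_collect_is_leaves_py subject facts visited (collect_is_leaves_py subject facts visited)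

-- ===== LEMMAS AND PROOFS =====

-- B's index, looked up at key k, is exactly A's `children` comprehension for k.
theorem getD_foldl_indexStep (facts : List (List (String × String))) (d0 : PySem.Dict String (List String)) (k : String) :
    PySem.Dict.getD (facts.foldl pvIndexStep d0) k []
      = PySem.Dict.getD d0 k [] ++ pvChildrenA k facts := by
  induction facts generalizing d0 with
  | nil => simp [pvChildrenA]
  | cons f rest ih =>
    rw [List.foldl_cons, ih]
    by_cases hv : PySem.Str.lower (pvGet f "relation") ∈ pvBeVerbs
    · by_cases hk : k = PySem.Str.lower (pvGet f "value")
      · subst hk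
        simp [pvChildrenA, pvIndexStep, hv, PySem.Dict.getD_modify_self]
      · simp [pvChildrenA, pvIndexStep, hv,
          PySem.Dict.getD_modify_of_ne _ _ _ hk, Ne.symm hk]
    · simp [pvChildrenA, pvIndexStep, hv]

theorem getD_buildIndex (facts : List (List (String × String))) (k : String) :
    PySem.Dict.getD (pvBuildIndex facts) k [] = pvChildrenA k facts := by
  simpa [PySem.Dict.getD, PySem.Dict.get?, PySem.Dict.empty] using
    getD_foldl_indexStep facts PySem.Dict.empty k

-- main invariant: B's accumulator DFS computes A's recursion, prefixed by the accumulator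
theorem dfs_eq_go (fuel : Nat) (facts : List (List (String × String))) :
    (∀ s vis leaves, pvDfsB fuel s (pvBuildIndex facts) vis leaves
        = (leaves ++ (pvGoA fuel s facts vis).1, (pvGoA fuel s facts vis).2)) ∧
    (∀ cs vis leaves, pvDfsBList fuel cs (pvBuildIndex facts) vis leaves
        = (leaves ++ (pvGoAList fuel cs facts vis).1, (pvGoAList fuel cs facts vis).2)) := by
  induction fuel with
  | zero =>
    refine ⟨fun s vis leaves => by simp [pvDfsB, pvGoA], ?_⟩
    intro cs
    induction cs with
    | nil => intro vis leaves; simp [pvDfsBList, pvGoAList]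
    | cons c cs ihc =>
      intro vis leaves
      simp [pvDfsBList, pvGoAList, pvDfsB, pvGoA, ihc]
  | succ fuel ih =>
    have hb : ∀ s vis leaves, pvDfsB (fuel+1) s (pvBuildIndex facts) vis leaves
        = (leaves ++ (pvGoA (fuel+1) s facts vis).1, (pvGoA (fuel+1) s facts vis).2) := by
      intro s vis leaves
      simp only [pvDfsB, pvGoA, getD_buildIndex]
      by_cases h1 : PySem.Str.lower s ∈ vis
      · simp [h1]
      · by_cases h2 : pvChildrenA (PySem.Str.lower s) facts = []
        · simp [h1, h2]
        · simp [h1, h2, ih.2]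
    refine ⟨hb, ?_⟩
    intro cs
    induction cs with
    | nil => intro vis leaves; simp [pvDfsBList, pvGoAList]
    | cons c cs ihc =>
      intro vis leaves
      simp [pvDfsBList, pvGoAList, hb, ihc]

-- ===== VERDICT (by name: the statement is the Claim_ definition above) =====
theorem collect_is_leaves_py_spec : Claim_equal_collect_is_leaves_py := by
  intro subject facts visited _
  unfold Spec_collect_is_leaves_py collect_is_leaves_py collect_is_leaves_py_alt
  rw [(dfs_eq_go (facts.length + 1) facts).1]
  simp
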